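-- pv_equiv track=rewrite | github.com/Th0rt/study-programing-skill | chapter4/question12.py | add_and_filter
-- ===== SOURCE A (Python) =====
-- def add_and_filter(nums, additional, threshold):
--     """
--     numsの各値にaddtionalを加算し、threshold比較する。
--     その後、thresholdと比較し、thresholdと等しい値と、thresholdより小さい数を返す。
--     """
--     equals = []
--     smalls = []
--
--     for num in nums:
--         t = num + additional
--
--         if t < threshold:
--             smalls.append(t)
--         if t == threshold:
--             equals.append(t)
--
--     return equals, smalls
-- ===== SOURCE B (Python) =====
-- def add_and_filter(nums, additional, threshold):
--     pivot = threshold - additional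
--     equals = [threshold] * nums.count(pivot)
--     smalls = [n + additional for n in nums if n < pivot]
--     return equals, smalls
-- ===== Notes on version B (the rewrite author's own statement) =====
-- stated objective: alternative
-- what changed: Instead of transforming each element and testing the result, B precomputes the pivot threshold-additional, builds the equals list in closed form as [threshold] * nums.count(pivot), and builds smalls by filtering the original values against the pivot before shifting them.
import Mathlib
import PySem

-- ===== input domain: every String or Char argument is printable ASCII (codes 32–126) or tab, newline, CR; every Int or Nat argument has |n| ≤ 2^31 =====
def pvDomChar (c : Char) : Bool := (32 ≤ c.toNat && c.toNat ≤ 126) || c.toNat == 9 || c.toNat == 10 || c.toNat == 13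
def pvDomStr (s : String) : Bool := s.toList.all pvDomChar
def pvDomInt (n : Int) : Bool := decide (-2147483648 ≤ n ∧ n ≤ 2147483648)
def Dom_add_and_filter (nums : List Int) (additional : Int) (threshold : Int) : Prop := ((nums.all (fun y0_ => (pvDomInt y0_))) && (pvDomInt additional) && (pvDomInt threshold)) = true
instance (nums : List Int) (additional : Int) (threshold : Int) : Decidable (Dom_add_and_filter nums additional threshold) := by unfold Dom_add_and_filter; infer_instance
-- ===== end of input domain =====

-- B precomputes a pivot, builds equals as a replicated constant from a count, and filters the original values before shifting; same return value.

-- ===== PORT A =====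
-- literal port: one loop, state (equals, smalls), both branches in A's order
def add_and_filter (nums : List Int) (additional : Int) (threshold : Int) : List Int × List Int :=
  let st := nums.foldl (fun (st : List Int × List Int) num =>
    let t := num + additional
    let st := if t < threshold then (st.1, st.2 ++ [t]) else st
    let st := if t = threshold then (st.1 ++ [t], st.2) else st
    st) ([], [])
  (st.1, st.2)

-- ===== PORT B =====
def add_and_filter_alt (nums : List Int) (additional : Int) (threshold : Int) : List Int × List Int :=
  let pivot := threshold - additional
  let equals := List.replicate (PySem.List.count nums pivot) threshold
  let smalls := (nums.filter (fun n => decide (n < pivot))).map (fun n => n + additional)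
  (equals, smalls)

-- ===== PRECONDITION & SPEC =====
def Spec_add_and_filter (nums : List Int) (additional : Int) (threshold : Int) (out : List Int × List Int) : Prop := out = add_and_filter_alt nums additional threshold
instance (nums : List Int) (additional : Int) (threshold : Int) (out : List Int × List Int) : Decidable (Spec_add_and_filter nums additional threshold out) := by unfold Spec_add_and_filter; infer_instance

-- ===== CLAIM (what is proved, stated in full; the proofs are below) =====
def Claim_equal_add_and_filter : Prop := ∀ (nums : List Int) (additional : Int) (threshold : Int), Dom_add_and_filter nums additional threshold → Spec_add_and_filter nums additional threshold (add_and_filter nums additional threshold)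

-- ===== LEMMAS AND PROOFS =====
theorem add_and_filter_fold (nums : List Int) (additional threshold : Int)
    (eq sm : List Int) :
    nums.foldl (fun (st : List Int × List Int) num =>
      let t := num + additional
      let st := if t < threshold then (st.1, st.2 ++ [t]) else st
      let st := if t = threshold then (st.1 ++ [t], st.2) else st
      st) (eq, sm)
    = (eq ++ List.replicate (PySem.List.count nums (threshold - additional)) threshold,
       sm ++ (nums.filter (fun n => decide (n < threshold - additional))).map (fun n => n + additional)) := by
  induction nums generalizing eq sm with
  | nil => simp [PySem.List.count]
  | cons n ns ih =>
    simp only [List.foldl_cons, PySem.List.count_eq, List.count_cons, List.filter_cons]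
    by_cases h2 : n = threshold - additional
    · have h1 : ¬ (n + additional < threshold) := by omega
      have ht : n + additional = threshold := by omega
      simp [ht, h2, ih, PySem.List.count_eq, List.append_assoc,
        ← List.replicate_succ, List.replicate_succ']
    · by_cases h1 : n + additional < threshold
      · have hlt : n < threshold - additional := by omega
        simp [h1, hlt, fun h => h2 (by omega : n = threshold - additional), ih,
          PySem.List.count_eq, List.append_assoc, show ¬ n + additional = threshold by omega]
      · have hlt : ¬ n < threshold - additional := by omega
        simp [h1, h2, hlt, ih, PySem.List.count_eq, show ¬ n + additional = threshold by omega]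

-- ===== VERDICT (by name: the statement is the Claim_ definition above) =====
theorem add_and_filter_spec : Claim_equal_add_and_filter := by
  intro nums additional threshold _
  unfold Spec_add_and_filter add_and_filter add_and_filter_alt
  simp [add_and_filter_fold]
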